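-- pv_equiv track=rewrite | github.com/OscarOzaine/Hackerraank | codefights/arcade/graphs/1-new-road-system.py | newRoadSystem
-- ===== SOURCE A (Python) =====
-- def newRoadSystem(roadRegister):
--     s = 0
--     ss = 0
--     for i in range(0, len(roadRegister)):
--         s = sum(roadRegister[i])
--         ss = 0
--         for row in roadRegister:
--             if row[i] == True:
--                 ss += 1
--
--         if s != ss:
--             return False
--     return True
-- ===== SOURCE B (Python) =====
-- def newRoadSystem(roadRegister):
--     rowTrue = []
--     trueCols = []
--     for row in roadRegister:
--         t = 0
--         for c, v in enumerate(row):
--             if v: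
--                 t += 1
--                 trueCols.append(c)
--         rowTrue.append(t)
--     colTrue = {}
--     for c in trueCols:
--         colTrue[c] = colTrue.get(c, 0) + 1
--     return all(rowTrue[i] == colTrue.get(i, 0) for i in range(len(roadRegister)))
-- ===== Notes on version B (the rewrite author's own statement) =====
-- stated objective: alternative
-- what changed: B makes one flat pass over all cells collecting per-row True-counts and the column indices of True cells, builds a frequency dictionary of those indices once, and finally compares the two tables, eliminating A's per-column rescans and early exit.
import Mathlib
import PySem

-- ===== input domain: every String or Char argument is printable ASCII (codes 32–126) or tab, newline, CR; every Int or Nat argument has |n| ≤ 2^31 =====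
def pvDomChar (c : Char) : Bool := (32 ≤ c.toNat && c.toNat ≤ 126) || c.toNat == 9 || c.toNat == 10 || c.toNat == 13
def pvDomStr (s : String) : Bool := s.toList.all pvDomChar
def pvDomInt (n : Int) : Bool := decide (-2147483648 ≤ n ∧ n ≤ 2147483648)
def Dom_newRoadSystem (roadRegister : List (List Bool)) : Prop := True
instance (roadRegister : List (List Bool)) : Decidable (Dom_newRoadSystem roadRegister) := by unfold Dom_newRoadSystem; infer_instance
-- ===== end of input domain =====

-- B replaces A's per-column rescans by one flat pass over the cells (per-row True-counts plus a
-- list of True-cell column indices), a frequency dictionary built once, and a final comparison.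

-- ===== PORT A =====
-- sum(roadRegister[i]) over a row of bools, recomputed each iteration by A
def pvSumRowA (row : List Bool) : Int :=
  row.foldl (fun a b => a + (if b then 1 else 0)) 0

-- A's inner loop: ss = number of rows with row[i] == True (row[i] via getD; Python raises on a
-- short row, where the value is not claimed — on such inputs outside Pre_ nothing is asserted)
def pvColCountA (rr : List (List Bool)) (i : Nat) : Int :=
  rr.foldl (fun acc row => if (row.getD i false) == true then acc + 1 else acc) 0

-- A's outer loop over i in range(0, len(roadRegister)), with early return False
def pvLoopA (rr : List (List Bool)) : List Nat → Bool
  | [] => true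
  | i :: rest =>
    let s := pvSumRowA (rr.getD i [])
    let ss := pvColCountA rr i
    if s ≠ ss then false else pvLoopA rr rest

def newRoadSystem (roadRegister : List (List Bool)) : Bool :=
  pvLoopA roadRegister (List.range roadRegister.length)

-- ===== PORT B =====
-- inner loop 'for c, v in enumerate(row): if v: t += 1; trueCols.append(c)'
def pvCellStep (p : Int × List Int) (cv : Int × Bool) : Int × List Int :=
  if cv.2 then (p.1 + 1, p.2 ++ [cv.1]) else p

-- outer pass 'for row in roadRegister: … rowTrue.append(t)' (state = (rowTrue, trueCols))
def pvScanRows (rr : List (List Bool)) : List Int × List Int :=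
  rr.foldl
    (fun st row =>
      let r := (PySem.List.enumerate row).foldl pvCellStep (0, st.2)
      (st.1 ++ [r.1], r.2))
    ([], [])

-- 'colTrue[c] = colTrue.get(c, 0) + 1' over trueCols
def pvColTable (trueCols : List Int) : PySem.Dict Int Int :=
  trueCols.foldl (fun d c => d.insert c (d.getD c 0 + 1)) PySem.Dict.empty

def newRoadSystem_alt (roadRegister : List (List Bool)) : Bool :=
  let st := pvScanRows roadRegister
  let colTrue := pvColTable st.2
  (List.range roadRegister.length).all
    (fun i => st.1.getD i 0 == colTrue.getD (i : Int) 0)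

-- ===== PRECONDITION & SPEC =====
-- Exactly the inputs on which Python A returns (A raises IndexError on the rest): either every
-- row is at least as long as the matrix (no index ever out of range), or some column that all
-- rows do cover is unbalanced, so A's loop returns False before reaching a short row.
def Pre_newRoadSystem (roadRegister : List (List Bool)) : Prop :=
  (∀ row ∈ roadRegister, roadRegister.length ≤ row.length) ∨
  (∃ j < roadRegister.length, (∀ row ∈ roadRegister, j < row.length) ∧
    (roadRegister.getD j []).count true ≠ roadRegister.countP (fun row => row.getD j false))
instance (roadRegister : List (List Bool)) : Decidable (Pre_newRoadSystem roadRegister) := by unfold Pre_newRoadSystem; infer_instance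

def pvWitness_newRoadSystem : List (List Bool) := [[true, false], [false, true]]

def Spec_newRoadSystem (roadRegister : List (List Bool)) (out : Bool) : Prop := out = newRoadSystem_alt roadRegister
instance (roadRegister : List (List Bool)) (out : Bool) : Decidable (Spec_newRoadSystem roadRegister out) := by unfold Spec_newRoadSystem; infer_instance

-- ===== CLAIM (what is proved, stated in full; the proofs are below) =====
def Claim_equal_newRoadSystem : Prop := ∀ (roadRegister : List (List Bool)), Dom_newRoadSystem roadRegister → Pre_newRoadSystem roadRegister → Spec_newRoadSystem roadRegister (newRoadSystem roadRegister)

-- ===== LEMMAS AND PROOFS =====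

-- column indices of the True cells of a row, starting at offset s
def pvTCols (row : List Bool) (s : Int) : List Int :=
  ((PySem.List.enumerate row s).filter (·.2)).map (·.1)

theorem pvTCols_cons (x : Bool) (xs : List Bool) (s : Int) :
    pvTCols (x :: xs) s = (if x then [s] else []) ++ pvTCols xs (s + 1) := by
  cases x <;> simp [pvTCols, PySem.List.enumerate_cons]

theorem pvCellStep_fold (row : List Bool) (s t0 : Int) (acc : List Int) :
    (PySem.List.enumerate row s).foldl pvCellStep (t0, acc)
      = (t0 + ((row.count true : Nat) : Int), acc ++ pvTCols row s) := by
  induction row generalizing s t0 acc with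
  | nil => simp [pvTCols]
  | cons x xs ih =>
    rw [PySem.List.enumerate_cons]
    cases x <;>
      simp [List.foldl_cons, pvCellStep, ih, pvTCols_cons] <;> push_cast <;> ring_nf

theorem pvTCols_count (row : List Bool) (s k : Int) :
    (pvTCols row s).count k
      = if 0 ≤ k - s ∧ row.getD (k - s).toNat false then 1 else 0 := by
  induction row generalizing s with
  | nil => simp [pvTCols]
  | cons x xs ih =>
    rw [pvTCols_cons, List.count_append, ih]
    rcases lt_trichotomy k s with h | h | h
    · cases x <;>
        simp [show s ≠ k by omega, show ¬ s < k from by omega, show ¬ s ≤ k from by omega]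
    · subst h
      have h1 : ¬ ((0:Int) ≤ k - (k + 1)) := by omega
      cases x <;> simp [h1]
    · have hm : (k - s).toNat = (k - (s + 1)).toNat + 1 := by omega
      cases x <;>
        simp [hm, show s ≠ k by omega, show s < k from h, show s ≤ k from le_of_lt h]

theorem pvScanRows_eq (rr : List (List Bool)) :
    pvScanRows rr
      = (rr.map (fun row => ((row.count true : Nat) : Int)),
         rr.flatMap (fun row => pvTCols row 0)) := by
  unfold pvScanRows
  suffices h : ∀ (l : List (List Bool)) (rt : List Int) (tc : List Int),
      l.foldl (fun st row =>
        let r := (PySem.List.enumerate row).foldl pvCellStep (0, st.2)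
        (st.1 ++ [r.1], r.2)) (rt, tc)
      = (rt ++ l.map (fun row => ((row.count true : Nat) : Int)),
         tc ++ l.flatMap (fun row => pvTCols row 0)) by
    simpa using h rr [] []
  intro l
  induction l with
  | nil => simp
  | cons row rest ih =>
    intro rt tc
    rw [List.foldl_cons]
    show (rest.foldl _ (rt ++ [((PySem.List.enumerate row 0).foldl pvCellStep (0, tc)).1],
        ((PySem.List.enumerate row 0).foldl pvCellStep (0, tc)).2)) = _
    rw [ih, pvCellStep_fold]
    simp

theorem pvColTable_getD (trueCols : List Int) (k : Int) :
    (pvColTable trueCols).getD k 0 = ((trueCols.count k : Nat) : Int) := by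
  simpa [pvColTable] using
    PySem.Dict.getD_foldl_insert_add_one trueCols PySem.Dict.empty k

theorem pvColCountA_eq (rr : List (List Bool)) (i : Nat) :
    pvColCountA rr i = ((rr.countP (fun row => row.getD i false) : Nat) : Int) := by
  simpa [pvColCountA, List.getD] using
    PySem.List.foldl_count_if (fun row => (row.getD i false) == true) rr 0

theorem pvSumRowA_eq (row : List Bool) :
    pvSumRowA row = ((row.count true : Nat) : Int) := by
  unfold pvSumRowA
  induction row with
  | nil => simp
  | cons x xs ih =>
    rw [List.foldl_cons]
    cases x <;>
      simp_all [PySem.List.foldl_add xs (fun b => if b then (1:Int) else 0)] <;> push_cast <;> ring_nf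

theorem pvLoopA_eq_all (rr : List (List Bool)) (is : List Nat) :
    pvLoopA rr is = is.all (fun i => pvSumRowA (rr.getD i []) == pvColCountA rr i) := by
  induction is with
  | nil => rfl
  | cons i rest ih =>
    rcases eq_or_ne (pvSumRowA (rr.getD i [])) (pvColCountA rr i) with h | h <;>
      simp [pvLoopA, ih, h, Bool.beq_eq_decide_eq]


theorem flatMap_count (rr : List (List Bool)) (i : Nat) :
    ((rr.flatMap (fun row => pvTCols row 0)).count (i : Int))
      = rr.countP (fun row => row.getD i false) := by
  induction rr with
  | nil => simp
  | cons row rest ih =>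
    rw [List.flatMap_cons, List.count_append, ih, List.countP_cons,
      pvTCols_count row 0 (i : Int)]
    simp [Nat.add_comm]

-- ===== VERDICT (by name: the statement is the Claim_ definition above) =====
theorem pvAllCongr {l : List Nat} {f g : Nat → Bool} (h : ∀ x ∈ l, f x = g x) :
    l.all f = l.all g := by
  induction l with
  | nil => rfl
  | cons x xs ih =>
    simp only [List.all_cons, h x (List.mem_cons_self), ih fun y hy => h y (List.mem_cons_of_mem x hy)]

theorem newRoadSystem_spec : Claim_equal_newRoadSystem := by
  intro rr _ _
  unfold Spec_newRoadSystem newRoadSystem newRoadSystem_alt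
  rw [pvLoopA_eq_all, pvScanRows_eq]
  refine (pvAllCongr ?_).symm
  intro i hi
  have hi' : i < rr.length := List.mem_range.mp hi
  have h1 : (rr.map (fun row => ((row.count true : Nat) : Int))).getD i 0
      = ((((rr.getD i []).count true : Nat)) : Int) := by
    have : (rr.map (fun row => ((row.count true : Nat) : Int)))[i]?
        = some (((rr[i].count true : Nat)) : Int) := by
      simp [List.getElem?_map, List.getElem?_eq_getElem hi']
    simp [List.getD, this, List.getElem?_eq_getElem hi']
  rw [h1, pvColTable_getD, flatMap_count, pvSumRowA_eq, pvColCountA_eq]
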